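-- pv_equiv track=rewrite | github.com/xucian/diagnosaurus.ai | services/fallback_research_service.py | _extract_diagnosis
-- ===== SOURCE A (Python) =====
-- from typing import List, Dict, Any, Optional
--
-- def _extract_diagnosis(results: List[Dict[str, Any]]) -> str:
--     """Extract diagnosis information"""
--     for result in results:
--         content = result.get("content", "")
--         if "diagnos" in content.lower():
--             # Find the sentence containing "diagnosis"
--             sentences = content.split(".")
--             for sentence in sentences:
--                 if "diagnos" in sentence.lower():
--                     return sentence.strip()[:300]
--     return ""
-- ===== SOURCE B (Python) =====
-- def _extract_diagnosis(results):
--     """Extract diagnosis information"""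
--     for result in results:
--         content = result.get("content", "")
--         idx = content.lower().find("diagnos")
--         if idx != -1:
--             # sentence boundaries around the first occurrence, no splitting
--             start = content.rfind(".", 0, idx) + 1
--             end = content.find(".", idx)
--             if end == -1:
--                 end = len(content)
--             return content[start:end].strip()[:300]
--     return ""
-- ===== Notes on version B (the rewrite author's own statement) =====
-- stated objective: alternative
-- what changed: Instead of splitting the content into sentences and scanning them, B locates the first occurrence of 'diagnos' in the lowered content with find() and reconstructs the enclosing sentence directly from the '.' boundaries around it (rfind before / find after), slicing it out of the original string; no sentence list is ever built.
import Mathlib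
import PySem

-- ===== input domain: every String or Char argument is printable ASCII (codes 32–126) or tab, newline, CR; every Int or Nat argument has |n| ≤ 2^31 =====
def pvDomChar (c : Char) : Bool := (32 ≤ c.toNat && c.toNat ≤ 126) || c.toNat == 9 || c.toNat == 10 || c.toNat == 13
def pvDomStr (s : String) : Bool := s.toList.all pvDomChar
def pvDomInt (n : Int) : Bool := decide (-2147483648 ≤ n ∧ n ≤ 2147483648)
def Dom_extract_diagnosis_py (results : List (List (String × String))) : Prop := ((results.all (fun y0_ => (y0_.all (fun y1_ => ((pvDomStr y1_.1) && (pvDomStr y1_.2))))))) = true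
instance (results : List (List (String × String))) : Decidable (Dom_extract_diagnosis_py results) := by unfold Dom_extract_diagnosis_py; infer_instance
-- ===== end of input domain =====

-- B replaces A's split-into-sentences scan by direct index arithmetic: find the first
-- occurrence of "diagnos" and cut the enclosing sentence out between the surrounding
-- '.' boundaries (rfind/find); no sentence list is built (alternative algorithm, same cost).

-- ===== PORT A =====
-- inner 'for sentence in sentences: if "diagnos" in sentence.lower(): return …'
def pyA_inner : List String → Option String
  | [] => none
  | s :: rest =>
    if PySem.Str.isIn "diagnos" (PySem.Str.lower s) then
      some (PySem.Str.slice (PySem.Str.strip s) none (some 300))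
    else pyA_inner rest

def extract_diagnosis_py : List (List (String × String)) → String
  | [] => ""
  | result :: rest =>
    let content := PySem.Dict.getD ⟨result⟩ "content" ""
    if PySem.Str.isIn "diagnos" (PySem.Str.lower content) then
      match pyA_inner ((PySem.Str.split? content ".").getD []) with
      | some v => v
      | none => extract_diagnosis_py rest
    else
      extract_diagnosis_py rest

-- ===== PORT B =====
def extract_diagnosis_py_alt : List (List (String × String)) → String
  | [] => ""
  | result :: rest =>
    let content := PySem.Dict.getD ⟨result⟩ "content" ""
    let idx := PySem.Str.find (PySem.Str.lower content) "diagnos"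
    if idx ≠ -1 then
      let start := PySem.Str.rfindFrom content "." 0 (some idx) + 1
      let end0 := PySem.Str.findFrom content "." idx none
      let endv := if end0 = -1 then PySem.Str.len content else end0
      PySem.Str.slice (PySem.Str.strip (PySem.Str.slice content (some start) (some endv))) none (some 300)
    else extract_diagnosis_py_alt rest

-- ===== PRECONDITION & SPEC =====
def Spec_extract_diagnosis_py (results : List (List (String × String))) (out : String) : Prop := out = extract_diagnosis_py_alt results
instance (results : List (List (String × String))) (out : String) : Decidable (Spec_extract_diagnosis_py results out) := by unfold Spec_extract_diagnosis_py; infer_instance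

-- ===== CLAIM (what is proved, stated in full; the proofs are below) =====
def Claim_equal_extract_diagnosis_py : Prop := ∀ (results : List (List (String × String))), Dom_extract_diagnosis_py results → Spec_extract_diagnosis_py results (extract_diagnosis_py results)

-- ===== LEMMAS AND PROOFS =====

-- the search pattern and the per-sentence predicate, as char lists
def dSub : List Char := "diagnos".toList

def pSeg (seg : List Char) : Bool := PySem.Chars.isIn dSub (seg.map PySem.Chars.lowerChar)

-- structural characterisation of Python's s.split(".") on char lists
def mySplit : List Char → List (List Char)
  | [] => [[]]
  | c :: r =>
    if c = '.' then [] :: mySplit r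
    else
      match mySplit r with
      | [] => [[c]]
      | h :: t => (c :: h) :: t

theorem mySplit_ne_nil (l : List Char) : mySplit l ≠ [] := by
  cases l with
  | nil => simp [mySplit]
  | cons c r =>
    simp only [mySplit]
    split <;> [simp; (split <;> simp)]

theorem mySplit_exists_cons (l : List Char) : ∃ h t, mySplit l = h :: t := by
  cases hm : mySplit l with
  | nil => exact absurd hm (mySplit_ne_nil l)
  | cons h t => exact ⟨h, t, rfl⟩

theorem splitOn_go_eq (fuel : Nat) : ∀ (l cur : List Char) (acc : List (List Char)),
    l.length ≤ fuel →
    PySem.Chars.splitOn.go ['.'] fuel l cur acc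
      = acc.reverse ++ ((cur.reverse ++ (mySplit l).headI) :: (mySplit l).tail) := by
  induction fuel with
  | zero =>
    intro l cur acc h
    have : l = [] := List.eq_nil_of_length_eq_zero (Nat.le_zero.mp h)
    subst this
    simp [PySem.Chars.splitOn.go, mySplit]
  | succ n ih =>
    intro l cur acc h
    cases l with
    | nil => simp [PySem.Chars.splitOn.go, mySplit]
    | cons c rest =>
      by_cases hc : c = '.'
      · subst hc
        have hpre : List.isPrefixOf ['.'] ('.' :: rest) = true := by
          simp [List.isPrefixOf]
        rw [PySem.Chars.splitOn.go]
        simp only [hpre, if_pos, List.length_cons, List.length_nil, List.drop_succ_cons,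
          List.drop_zero]
        rw [ih rest [] _ (by simpa using Nat.le_of_succ_le_succ h)]
        obtain ⟨h0, t0, hms⟩ := mySplit_exists_cons rest
        simp [mySplit, hms]
      · have hpre : List.isPrefixOf ['.'] (c :: rest) = false := by
          simp [List.isPrefixOf]
          intro hcc; exact absurd hcc.symm hc
        rw [PySem.Chars.splitOn.go]
        simp only [hpre, Bool.false_eq_true, if_false]
        rw [ih rest (c :: cur) acc (by simpa using Nat.le_of_succ_le_succ h)]
        obtain ⟨h0, t0, hms⟩ := mySplit_exists_cons rest
        simp [mySplit, hc, hms]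

theorem splitOn_eq_mySplit (l : List Char) : PySem.Chars.splitOn l ['.'] = mySplit l := by
  unfold PySem.Chars.splitOn
  rw [splitOn_go_eq (l.length + 1) l [] [] (Nat.le_succ _)]
  obtain ⟨h0, t0, hms⟩ := mySplit_exists_cons l
  simp [hms]

theorem mySplit_headI (l : List Char) : (mySplit l).headI = l.takeWhile (· ≠ '.') := by
  induction l with
  | nil => simp [mySplit]
  | cons c r ih =>
    by_cases hc : c = '.'
    · subst hc; simp [mySplit, List.takeWhile]
    · obtain ⟨h0, t0, hms⟩ := mySplit_exists_cons r
      simp only [mySplit, hc, if_false, hms, List.takeWhile]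
      simp only [hms, List.headI] at ih
      simp [hc, ih]

-- string-level segments of a content
theorem segs_eq (content : String) :
    (PySem.Str.split? content ".").getD [] = (mySplit content.toList).map String.ofList := by
  simp [PySem.Str.split?, PySem.Chars.split?, splitOn_eq_mySplit]

theorem p_ofList (seg : List Char) :
    PySem.Str.isIn "diagnos" (PySem.Str.lower (String.ofList seg)) = pSeg seg := by
  simp [PySem.Str.isIn, PySem.Str.lower, PySem.Chars.lower, pSeg, dSub]

theorem inner_eq (segs : List String) :
    pyA_inner segs = (segs.find? (fun s => PySem.Str.isIn "diagnos" (PySem.Str.lower s))).map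
      (fun s => PySem.Str.slice (PySem.Str.strip s) none (some 300)) := by
  induction segs with
  | nil => rfl
  | cons s rest ih =>
    show (if PySem.Str.isIn "diagnos" (PySem.Str.lower s) = true then
        some (PySem.Str.slice (PySem.Str.strip s) none (some 300))
      else pyA_inner rest) = _
    by_cases hp : PySem.Str.isIn "diagnos" (PySem.Str.lower s) = true
    · rw [if_pos hp, List.find?_cons_of_pos (p := fun s => PySem.Str.isIn "diagnos" (PySem.Str.lower s)) hp]
      rfl
    · rw [if_neg hp, List.find?_cons_of_neg (p := fun s => PySem.Str.isIn "diagnos" (PySem.Str.lower s)) (by simpa using hp), ih]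

-- '.' occurs as a prefix of l.drop j exactly when l[j] is '.'
theorem dot_prefix_iff (l : List Char) (j : Nat) : ['.'] <+: l.drop j ↔ l[j]? = some '.' := by
  rw [← List.head?_drop]
  cases l.drop j with
  | nil => simp
  | cons a t =>
    simp [List.cons_prefix_cons, eq_comm]

-- takeWhile stops no later than any failing position
theorem takeWhile_length_le (l : List Char) (k : Nat) (h : l[k]? = some '.') :
    (l.takeWhile (· ≠ '.')).length ≤ k := by
  induction l generalizing k with
  | nil => simp at h
  | cons c r ih =>
    by_cases hc : c = '.'
    · subst hc; simp [List.takeWhile]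
    · cases k with
      | zero => simp at h; exact absurd h hc
      | succ k' =>
        simp only [List.getElem?_cons_succ] at h
        calc (List.takeWhile (· ≠ '.') (c :: r)).length
            = (List.takeWhile (· ≠ '.') r).length + 1 := by
              simp [List.takeWhile_cons, hc]
          _ ≤ k' + 1 := Nat.succ_le_succ (ih k' h)

-- takeWhile as a take, given the exact stopping point
theorem takeWhile_eq_take_of (l : List Char) (e : Nat)
    (hin : ∀ j, j < e → l[j]? ≠ some '.')
    (hend : e = l.length ∨ l[e]? = some '.') :
    l.takeWhile (· ≠ '.') = l.take e := by
  induction l generalizing e with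
  | nil => simp
  | cons c r ih =>
    cases e with
    | zero =>
      rcases hend with h | h
      · simp at h
      · simp only [List.getElem?_cons_zero, Option.some.injEq] at h
        subst h
        simp [List.takeWhile]
    | succ e' =>
      have hc : c ≠ '.' := by
        have := hin 0 (Nat.succ_pos _)
        simpa using this
      have hin' : ∀ j, j < e' → r[j]? ≠ some '.' := by
        intro j hj
        have := hin (j + 1) (by omega)
        simpa using this
      have hend' : e' = r.length ∨ r[e']? = some '.' := by
        rcases hend with h | h
        · left; simpa using h
        · right; simpa using h
      have hr := ih e' hin' hend'
      simp only [List.takeWhile_cons, List.take_succ_cons]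
      simp only [hc, decide_not, decide_eq_true_eq] at hr ⊢
      simp [hc, hr]

-- spec of PySem.Chars.rfind.go (counts candidate start positions down from n)
theorem rfind_go_none (s sub : List Char) (n : Nat)
    (h : ∀ j, j ≤ n → ¬ sub <+: s.drop j) :
    PySem.Chars.rfind.go s sub n = -1 := by
  induction n with
  | zero =>
    rw [PySem.Chars.rfind.go, if_neg]
    intro hp
    exact h 0 (Nat.le_refl 0) (by simpa [List.isPrefixOf_iff_prefix] using hp)
  | succ n ih =>
    rw [PySem.Chars.rfind.go, if_neg, ih (fun j hj => h j (Nat.le_succ_of_le hj))]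
    intro hp
    exact h (n + 1) (Nat.le_refl _) (by simpa [List.isPrefixOf_iff_prefix] using hp)

theorem rfind_go_eq (s sub : List Char) (n j : Nat)
    (hj : j ≤ n) (hp : sub <+: s.drop j)
    (hmax : ∀ i, j < i → i ≤ n → ¬ sub <+: s.drop i) :
    PySem.Chars.rfind.go s sub n = (j : Int) := by
  induction n with
  | zero =>
    have hj0 : j = 0 := Nat.le_zero.mp hj
    subst hj0
    rw [PySem.Chars.rfind.go, if_pos (by simpa [List.isPrefixOf_iff_prefix] using hp)]
    simp
  | succ n ih =>
    rw [PySem.Chars.rfind.go]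
    by_cases hcase : j = n + 1
    · subst hcase
      rw [if_pos (by simpa [List.isPrefixOf_iff_prefix] using hp)]
    · have hjn : j ≤ n := by omega
      rw [if_neg, ih hjn (fun i h1 h2 => hmax i h1 (Nat.le_succ_of_le h2))]
      intro hpp
      exact hmax (n + 1) (by omega) (Nat.le_refl _) (by simpa [List.isPrefixOf_iff_prefix] using hpp)

-- THE KEY LEMMA: the first 'diagnos'-containing segment of split('.') is exactly
-- the maximal dot-free window [s, e) around the first occurrence of 'diagnos'
theorem key (l : List Char) (idx s e : Nat)
    (h1 : dSub <+: (l.map PySem.Chars.lowerChar).drop idx)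
    (h2 : ∀ i, i < idx → ¬ dSub <+: (l.map PySem.Chars.lowerChar).drop i)
    (hs1 : s ≤ idx)
    (hs2 : ∀ j, s ≤ j → j < idx → l[j]? ≠ some '.')
    (hs3 : s = 0 ∨ l[s - 1]? = some '.')
    (he1 : idx ≤ e) (he2 : e ≤ l.length)
    (he3 : ∀ j, idx ≤ j → j < e → l[j]? ≠ some '.')
    (he4 : e = l.length ∨ l[e]? = some '.') :
    (mySplit l).find? pSeg = some ((l.drop s).take (e - s)) := by
  induction l generalizing idx s e with
  | nil =>
    exfalso
    simp only [List.map_nil, List.drop_nil] at h1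
    exact absurd (List.prefix_nil.mp h1) (by decide)
  | cons c r ih =>
    by_cases hc : c = '.'
    · subst hc
      obtain ⟨idx', rfl⟩ : ∃ k, idx = k + 1 := by
        cases idx with
        | zero =>
          exfalso
          simp only [List.map_cons, List.drop_zero] at h1
          obtain ⟨t, ht⟩ := h1
          rw [show dSub = 'd' :: "iagnos".toList from rfl] at ht
          simp only [List.cons_append, List.cons.injEq] at ht
          have hlc : PySem.Chars.lowerChar '.' = '.' := by decide
          rw [hlc] at ht
          exact absurd ht.1 (by decide)
        | succ k => exact ⟨k, rfl⟩
      obtain ⟨s', rfl⟩ : ∃ k, s = k + 1 := by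
        cases s with
        | zero =>
          exfalso
          have := hs2 0 (Nat.le_refl 0) (by omega)
          simp at this
        | succ k => exact ⟨k, rfl⟩
      obtain ⟨e', rfl⟩ : ∃ k, e = k + 1 := by
        cases e with
        | zero => exact absurd he1 (by omega)
        | succ k => exact ⟨k, rfl⟩
      have h1' : dSub <+: (r.map PySem.Chars.lowerChar).drop idx' := by simpa using h1
      have h2' : ∀ i, i < idx' → ¬ dSub <+: (r.map PySem.Chars.lowerChar).drop i := by
        intro i hi
        have := h2 (i + 1) (by omega)
        simpa using this
      have hs2' : ∀ j, s' ≤ j → j < idx' → r[j]? ≠ some '.' := by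
        intro j hj hj2
        have := hs2 (j + 1) (by omega) (by omega)
        simpa using this
      have hs3' : s' = 0 ∨ r[s' - 1]? = some '.' := by
        cases s' with
        | zero => exact Or.inl rfl
        | succ k =>
          right
          have := hs3.resolve_left (by omega)
          simpa using this
      have he3' : ∀ j, idx' ≤ j → j < e' → r[j]? ≠ some '.' := by
        intro j hj hj2
        have := he3 (j + 1) (by omega) (by omega)
        simpa using this
      have he4' : e' = r.length ∨ r[e']? = some '.' := by
        rcases he4 with h | h
        · left; simpa using h
        · right; simpa using h
      rw [show mySplit ('.' :: r) = [] :: mySplit r from by simp [mySplit]]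
      rw [List.find?_cons_of_neg (by decide)]
      rw [ih idx' s' e' h1' h2' (by omega) hs2' hs3' (by omega) (by simpa using he2) he3' he4']
      simp
    · obtain ⟨h0, t0, hms⟩ := mySplit_exists_cons r
      have hsplit : mySplit (c :: r) = (c :: h0) :: t0 := by simp [mySplit, hc, hms]
      have hh0 : c :: h0 = (c :: r).takeWhile (· ≠ '.') := by
        have := mySplit_headI (c :: r)
        rw [hsplit] at this
        simpa using this
      have hd7 : dSub.length = 7 := by decide
      rcases hs3 with hs0 | hdot
      · subst hs0
        have hnd : ∀ j, j < e → (c :: r)[j]? ≠ some '.' := by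
          intro j hj
          by_cases hji : j < idx
          · exact hs2 j (Nat.zero_le j) hji
          · exact he3 j (by omega) hj
        have htake : (c :: r).takeWhile (· ≠ '.') = (c :: r).take e :=
          takeWhile_eq_take_of _ e hnd he4
        have hlen : idx + 7 ≤ (c :: r).length := by
          have hle := h1.length_le
          simp only [List.length_drop, List.length_map] at hle
          omega
        have he7 : idx + 7 ≤ e := by
          by_contra hlt
          push_neg at hlt
          rcases he4 with hE | hE
          · omega
          · obtain ⟨t, ht⟩ := h1
            have hlt7 : e - idx < dSub.length := by omega
            have h1e : ((c :: r).map PySem.Chars.lowerChar)[e]? = dSub[e - idx]? := by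
              have hh : ((c :: r).map PySem.Chars.lowerChar)[e]?
                  = (((c :: r).map PySem.Chars.lowerChar).drop idx)[e - idx]? := by
                rw [List.getElem?_drop]
                congr 1
                omega
              rw [hh, ← ht, List.getElem?_append_left hlt7]
            have hmapE : ((c :: r).map PySem.Chars.lowerChar)[e]? = some '.' := by
              rw [List.getElem?_map, hE]
              simp [show PySem.Chars.lowerChar '.' = '.' from by decide]
            have hmem : '.' ∈ dSub := List.mem_of_getElem? (h1e.symm.trans hmapE)
            exact absurd hmem (by decide)
        have hp : pSeg (c :: h0) = true := by
          rw [hh0, htake]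
          unfold pSeg
          rw [← PySem.Chars.exists_prefix_drop_iff_isIn]
          refine ⟨idx, ?_⟩
          rw [List.map_take, List.drop_take, List.prefix_take_iff]
          exact ⟨h1, by omega⟩
        rw [hsplit, List.find?_cons_of_pos hp]
        rw [show c :: h0 = (c :: r).take e from by rw [hh0, htake]]
        simp
      · have hsge2 : 2 ≤ s := by
          rcases s with _ | s1
          · exact absurd (by simpa using hdot) hc
          · rcases s1 with _ | s2
            · exact absurd (by simpa using hdot) hc
            · omega
        have hsegle : (c :: h0).length ≤ s - 1 := by
          rw [hh0]
          exact takeWhile_length_le _ _ hdot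
        have hnp : ¬ pSeg (c :: h0) = true := by
          intro hp
          unfold pSeg at hp
          rw [← PySem.Chars.exists_prefix_drop_iff_isIn] at hp
          obtain ⟨j, hj⟩ := hp
          have hlenj : j + 7 ≤ (c :: h0).length := by
            have := hj.length_le
            simp only [List.length_drop, List.length_map] at this
            omega
          have hpre : (c :: h0) <+: (c :: r) := by
            rw [hh0]; exact List.takeWhile_prefix _
          have hj2 : dSub <+: ((c :: r).map PySem.Chars.lowerChar).drop j :=
            hj.trans ((hpre.map _).drop j)
          exact h2 j (by omega) hj2
        have hnp0 : ¬ pSeg h0 = true := by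
          intro hp
          apply hnp
          unfold pSeg at hp ⊢
          rw [← PySem.Chars.exists_prefix_drop_iff_isIn] at hp ⊢
          obtain ⟨j, hj⟩ := hp
          exact ⟨j + 1, by simpa using hj⟩
        obtain ⟨idx', rfl⟩ : ∃ k, idx = k + 1 := ⟨idx - 1, by omega⟩
        obtain ⟨s', rfl⟩ : ∃ k, s = k + 1 := ⟨s - 1, by omega⟩
        obtain ⟨e', rfl⟩ : ∃ k, e = k + 1 := ⟨e - 1, by omega⟩
        have h1' : dSub <+: (r.map PySem.Chars.lowerChar).drop idx' := by simpa using h1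
        have h2' : ∀ i, i < idx' → ¬ dSub <+: (r.map PySem.Chars.lowerChar).drop i := by
          intro i hi
          have := h2 (i + 1) (by omega)
          simpa using this
        have hs2' : ∀ j, s' ≤ j → j < idx' → r[j]? ≠ some '.' := by
          intro j hj hj2
          have := hs2 (j + 1) (by omega) (by omega)
          simpa using this
        have hs3' : s' = 0 ∨ r[s' - 1]? = some '.' := by
          right
          obtain ⟨s'', rfl⟩ : ∃ k, s' = k + 1 := ⟨s' - 1, by omega⟩
          simpa using hdot
        have he3' : ∀ j, idx' ≤ j → j < e' → r[j]? ≠ some '.' := by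
          intro j hj hj2
          have := he3 (j + 1) (by omega) (by omega)
          simpa using this
        have he4' : e' = r.length ∨ r[e']? = some '.' := by
          rcases he4 with h | h
          · left; simpa using h
          · right; simpa using h
        have hihr := ih idx' s' e' h1' h2' (by omega) hs2' hs3' (by omega) (by simpa using he2) he3' he4'
        rw [hms, List.find?_cons_of_neg (by simpa using hnp0)] at hihr
        rw [hsplit, List.find?_cons_of_neg (by simpa using hnp), hihr]
        simp

-- rfind(sub, 0, k) reduces to rfind on the first k characters
theorem rfindFrom_zero_upto (x sub : List Char) (k : Nat) (hk : k ≤ x.length) :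
    PySem.Chars.rfindFrom x sub 0 (some (k : Int))
      = (if PySem.Chars.rfind (x.take k) sub = -1 then -1
         else PySem.Chars.rfind (x.take k) sub) := by
  have h1 : ¬ ((x.length : Int) < (k : Int)) := by exact_mod_cast Nat.not_lt.mpr hk
  have h2 : ¬ ((k : Int) < 0) := not_lt.mpr (Int.natCast_nonneg k)
  simp only [PySem.Chars.rfindFrom, h1, h2, if_false, lt_self_iff_false, Int.toNat_natCast,
    Int.toNat_zero, List.drop_zero, zero_add]

-- per-content lemma: A's inner scan result written as B computes it
set_option maxHeartbeats 1000000 in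
theorem content_case (content : String)
    (hg : PySem.Str.isIn "diagnos" (PySem.Str.lower content) = true) :
    pyA_inner ((PySem.Str.split? content ".").getD [])
      = some (PySem.Str.slice (PySem.Str.strip (PySem.Str.slice content
          (some (PySem.Str.rfindFrom content "." 0 (some (PySem.Str.find (PySem.Str.lower content) "diagnos")) + 1))
          (some (if PySem.Str.findFrom content "." (PySem.Str.find (PySem.Str.lower content) "diagnos") none = -1
                 then PySem.Str.len content
                 else PySem.Str.findFrom content "." (PySem.Str.find (PySem.Str.lower content) "diagnos")))))
          none (some 300)) := by
  -- char-level setup: the first occurrence of 'diagnos' in the lowered content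
  have hg' : PySem.Chars.isIn dSub (content.toList.map PySem.Chars.lowerChar) = true := by
    simpa [PySem.Chars.lower] using hg
  have hinf : dSub <:+: (content.toList.map PySem.Chars.lowerChar) :=
    (PySem.Chars.isIn_iff_infix _ _).mp hg'
  have hfnn : 0 ≤ PySem.Chars.find (content.toList.map PySem.Chars.lowerChar) dSub :=
    (PySem.Chars.find_nonneg_iff _ _).mpr hinf
  obtain ⟨h1, h2⟩ := PySem.Chars.find_spec hfnn
  set l := content.toList with hl
  set idx := (PySem.Chars.find (l.map PySem.Chars.lowerChar) dSub).toNat with hidx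
  have hidxcast : PySem.Chars.find (l.map PySem.Chars.lowerChar) dSub = (idx : Int) :=
    (Int.toNat_of_nonneg hfnn).symm
  have hidx7 : idx + 7 ≤ l.length := by
    have hle := h1.length_le
    simp only [List.length_drop, List.length_map] at hle
    have : dSub.length = 7 := by decide
    omega
  have hfind_eq : PySem.Str.find (PySem.Str.lower content) "diagnos" = (idx : Int) := by
    rw [← hidxcast]
    show PySem.Chars.find (PySem.Str.lower content).toList "diagnos".toList = _
    rw [PySem.Str.toList_lower]
    simp [PySem.Chars.lower, dSub, hl]
  rw [hfind_eq]
  -- the start boundary: rfind '.' below idx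
  have hrfS : PySem.Str.rfindFrom content "." 0 (some (idx : Int))
      = PySem.Chars.rfindFrom l ['.'] 0 (some (idx : Int)) := rfl
  -- the end boundary: find '.' from idx
  have hffS : PySem.Str.findFrom content "." (idx : Int) none
      = PySem.Chars.findFrom l ['.'] (idx : Int) none := rfl
  have hff := PySem.Chars.findFrom_natCast l ['.'] idx (by omega)
  have hrf := rfindFrom_zero_upto l ['.'] idx (by omega)
  -- produce the start index s with its properties
  obtain ⟨s, hstart, hs1, hs2, hs3⟩ :
      ∃ s : Nat, PySem.Str.rfindFrom content "." 0 (some (idx : Int)) + 1 = (s : Int)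
        ∧ s ≤ idx ∧ (∀ j, s ≤ j → j < idx → l[j]? ≠ some '.')
        ∧ (s = 0 ∨ l[s - 1]? = some '.') := by
    by_cases hA : ∃ j, j < idx ∧ l[j]? = some '.'
    · set J := Nat.findGreatest (fun j => l[j]? = some '.') (idx - 1) with hJ
      obtain ⟨j0, hj0lt, hj0⟩ := hA
      have hidxpos : 1 ≤ idx := by omega
      have hPJ : l[J]? = some '.' := by
        rw [hJ]
        exact Nat.findGreatest_spec (P := fun j => l[j]? = some '.') (m := j0) (n := idx - 1)
          (by omega) hj0
      have hJle : J ≤ idx - 1 := Nat.findGreatest_le _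
      have hlen_take : (l.take idx).length = idx := by
        rw [List.length_take]
        omega
      have hrv : PySem.Chars.rfind (l.take idx) ['.'] = (J : Int) := by
        show PySem.Chars.rfind.go (l.take idx) ['.'] (l.take idx).length = _
        apply rfind_go_eq
        · omega
        · rw [dot_prefix_iff, List.getElem?_take, if_pos (by omega)]
          exact hPJ
        · intro i hgt hle
          rw [dot_prefix_iff, List.getElem?_take]
          by_cases hi : i < idx
          · rw [if_pos hi]
            exact Nat.findGreatest_is_greatest (P := fun j => l[j]? = some '.')
              (n := idx - 1) hgt (by omega)
          · rw [if_neg hi]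
            simp
      refine ⟨J + 1, ?_, by omega, ?_, Or.inr (by simpa using hPJ)⟩
      · rw [hrfS, hrf, hrv, if_neg (by omega : ¬ ((J : Int) = -1))]
        omega
      · intro j hj hj2
        exact Nat.findGreatest_is_greatest (P := fun j => l[j]? = some '.')
          (n := idx - 1) (by omega) (by omega)
    · push_neg at hA
      refine ⟨0, ?_, Nat.zero_le _, fun j _ hj => hA j hj, Or.inl rfl⟩
      have hrv : PySem.Chars.rfind (l.take idx) ['.'] = -1 := by
        show PySem.Chars.rfind.go (l.take idx) ['.'] (l.take idx).length = -1
        apply rfind_go_none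
        intro j _
        rw [dot_prefix_iff, List.getElem?_take]
        by_cases hi : j < idx
        · rw [if_pos hi]; exact hA j hi
        · rw [if_neg hi]; simp
      rw [hrfS, hrf, hrv, if_pos rfl]
      simp
  -- produce the end index e with its properties
  obtain ⟨e, hend, he1, he2, he3, he4⟩ :
      ∃ e : Nat, (if PySem.Str.findFrom content "." (idx : Int) none = -1
            then PySem.Str.len content else PySem.Str.findFrom content "." (idx : Int) none) = (e : Int)
        ∧ idx ≤ e ∧ e ≤ l.length ∧ (∀ j, idx ≤ j → j < e → l[j]? ≠ some '.')
        ∧ (e = l.length ∨ l[e]? = some '.') := by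
    by_cases hB : PySem.Chars.find (l.drop idx) ['.'] = -1
    · refine ⟨l.length, ?_, by omega, Nat.le_refl _, ?_, Or.inl rfl⟩
      · rw [hffS, hff, if_pos hB]
        simp [PySem.Str.len, hl]
      · intro j hj hj2 hdot
        have hpre : ['.'] <+: (l.drop idx).drop (j - idx) := by
          rw [dot_prefix_iff, List.getElem?_drop]
          rw [show idx + (j - idx) = j from by omega]
          exact hdot
        have : PySem.Chars.isIn ['.'] (l.drop idx) = true :=
          (PySem.Chars.exists_prefix_drop_iff_isIn _ _).mp ⟨j - idx, hpre⟩
        rw [PySem.Chars.find_eq_neg_one_iff] at hB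
        exact hB ((PySem.Chars.isIn_iff_infix _ _).mp this)
    · have hf0 : 0 ≤ PySem.Chars.find (l.drop idx) ['.'] :=
        (PySem.Chars.find_nonneg_iff _ _).mpr ((PySem.Chars.find_ne_neg_one_iff _ _).mp hB)
      obtain ⟨hfp, hfmin⟩ := PySem.Chars.find_spec hf0
      set fN := (PySem.Chars.find (l.drop idx) ['.']).toNat with hfN
      have hfcast : PySem.Chars.find (l.drop idx) ['.'] = (fN : Int) :=
        (Int.toNat_of_nonneg hf0).symm
      have hdotE : l[idx + fN]? = some '.' := by
        rw [← List.getElem?_drop]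
        exact (dot_prefix_iff _ _).mp hfp
      obtain ⟨hlt, -⟩ := List.getElem?_eq_some_iff.mp hdotE
      refine ⟨idx + fN, ?_, by omega, by omega, ?_, Or.inr hdotE⟩
      · rw [hffS, hff, hfcast, if_neg (by omega : ¬ ((fN : Int) = -1))]
        omega
      · intro j hj hj2 hdot
        have : ['.'] <+: (l.drop idx).drop (j - idx) := by
          rw [dot_prefix_iff, List.getElem?_drop]
          rw [show idx + (j - idx) = j from by omega]
          exact hdot
        exact hfmin (j - idx) (by omega) this
  rw [hstart, hend]
  -- both sides are now the same sentence
  have hkey := key l idx s e h1 h2 hs1 hs2 hs3 he1 he2 he3 he4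
  rw [segs_eq, inner_eq]
  have hcomp : ((fun s => PySem.Str.isIn "diagnos" (PySem.Str.lower s)) ∘ String.ofList) = pSeg :=
    funext fun x => p_ofList x
  rw [← hl, List.find?_map, hcomp, hkey]
  have hofl : String.ofList ((l.drop s).take (e - s))
      = PySem.Str.slice content (some (s : Int)) (some (e : Int)) := by
    apply String.toList_inj.mp
    simp only [PySem.Str.toList_slice, PySem.Chars.slice_eq_listSlice, PySem.List.slice_natCast]
    simp [hl]
  rw [Option.map_map]
  rw [Option.map_some, Function.comp_apply, hofl]

theorem main_eq (results : List (List (String × String))) :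
    extract_diagnosis_py results = extract_diagnosis_py_alt results := by
  induction results with
  | nil => simp [extract_diagnosis_py, extract_diagnosis_py_alt]
  | cons r rest ih =>
    unfold extract_diagnosis_py extract_diagnosis_py_alt
    set content := PySem.Dict.getD ⟨r⟩ "content" "" with hcontent
    by_cases hg : PySem.Str.isIn "diagnos" (PySem.Str.lower content) = true
    · have hfind : PySem.Str.find (PySem.Str.lower content) "diagnos" ≠ -1 := by
        rw [ne_eq, PySem.Str.find_eq_neg_one_iff, not_not]
        exact (PySem.Chars.isIn_iff_infix _ _).mp (by simpa using hg)
      simp only [hg, if_pos, hfind, ne_eq, not_false_iff, content_case content hg]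
    · have hfind : ¬ PySem.Str.find (PySem.Str.lower content) "diagnos" ≠ -1 := by
        rw [ne_eq, not_not, PySem.Str.find_eq_neg_one_iff]
        exact (PySem.Chars.isIn_eq_false_iff _ _).mp (by simpa using hg)
      rw [if_neg hg, if_neg hfind]
      exact ih

-- ===== VERDICT (by name: the statement is the Claim_ definition above) =====
theorem extract_diagnosis_py_spec : Claim_equal_extract_diagnosis_py := by
  intro results _
  unfold Spec_extract_diagnosis_py
  exact main_eq results
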